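-- pv_equiv track=rewrite | github.com/CentreForDigitalHumanities/I-analyzer | backend/corpora/peaceportal/northafrica.py | convert_language_codes
-- ===== SOURCE A (Python) =====
-- from typing import List, Optional, Tuple, Union
--
-- def convert_languages(value: str) -> List[str]:
--     expected_languages = ['greek', 'latin', 'hebrew', 'semitic']
--     languages = [lang.strip().replace('(', '').replace(')', '')
--                  for lang in value.strip().split(';')]
--     return [lang if lang.lower() in expected_languages else 'Unknown' for lang in languages]
--
-- def convert_language_codes(value: str) -> List[str]:
--     codes = {
--         'Greek': 'el',
--         'Latin': 'la',
--         'Hebrew': 'he',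
--         'Semitic': 'sem'
--     }
--     return [codes.get(lang, 'Unknown') for lang in convert_languages(value)]
-- ===== SOURCE B (Python) =====
-- def convert_language_codes(value: str) -> list:
--     result = []
--     for lang in value.strip().split(';'):
--         lang = lang.strip().replace('(', '').replace(')', '')
--         if lang == 'Greek':
--             result.append('el')
--         elif lang == 'Latin':
--             result.append('la')
--         elif lang == 'Hebrew':
--             result.append('he')
--         elif lang == 'Semitic':
--             result.append('sem')
--         else:
--             result.append('Unknown')
--     return result
-- ===== Notes on version B (the rewrite author's own statement) =====
-- stated objective: simpler
-- what changed: Replaces the two-stage pipeline (helper building an intermediate 'Unknown'-normalized list, then a dict lookup per element) with a single accumulator loop that cleans each token and maps it to its code by a direct if/elif chain, with no helper, no intermediate list and no dict.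
import Mathlib
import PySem

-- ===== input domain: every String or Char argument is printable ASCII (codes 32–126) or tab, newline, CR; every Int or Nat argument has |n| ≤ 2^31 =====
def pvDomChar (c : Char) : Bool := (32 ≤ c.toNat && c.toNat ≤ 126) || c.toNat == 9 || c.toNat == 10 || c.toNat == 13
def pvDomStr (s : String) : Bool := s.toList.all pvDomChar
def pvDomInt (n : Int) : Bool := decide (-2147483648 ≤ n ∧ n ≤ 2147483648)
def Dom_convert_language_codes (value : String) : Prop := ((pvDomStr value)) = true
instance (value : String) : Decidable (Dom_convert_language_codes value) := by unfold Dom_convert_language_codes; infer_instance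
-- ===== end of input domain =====

-- B: one accumulator loop (clean token, direct if/elif chain to its code) instead of A's
-- helper-plus-dict two-stage pipeline; same values everywhere, total.

-- ===== PORT A =====
def convert_languages (value : String) : List String :=
  let expected_languages : List String := ["greek", "latin", "hebrew", "semitic"]
  let languages : List String :=
    ((PySem.Str.split? (PySem.Str.strip value) ";").getD []).map
      (fun lang => PySem.Str.replace (PySem.Str.replace (PySem.Str.strip lang) "(" "") ")" "")
  languages.map (fun lang =>
    if expected_languages.contains (PySem.Str.lower lang) then lang else "Unknown")

def convert_language_codes (value : String) : List String :=
  let codes : PySem.Dict String String :=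
    ((((PySem.Dict.empty).insert "Greek" "el").insert "Latin" "la").insert
      "Hebrew" "he").insert "Semitic" "sem"
  (convert_languages value).map (fun lang => codes.getD lang "Unknown")

-- ===== PORT B =====
def convert_language_codes_alt (value : String) : List String :=
  ((PySem.Str.split? (PySem.Str.strip value) ";").getD []).foldl
    (fun result lang =>
      let lang := PySem.Str.replace (PySem.Str.replace (PySem.Str.strip lang) "(" "") ")" ""
      result ++ [if lang == "Greek" then "el"
                 else if lang == "Latin" then "la"
                 else if lang == "Hebrew" then "he"
                 else if lang == "Semitic" then "sem"
                 else "Unknown"]) []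

-- ===== PRECONDITION & SPEC =====
def Spec_convert_language_codes (value : String) (out : List String) : Prop := out = convert_language_codes_alt value
instance (value : String) (out : List String) : Decidable (Spec_convert_language_codes value out) := by unfold Spec_convert_language_codes; infer_instance

-- ===== CLAIM (what is proved, stated in full; the proofs are below) =====
def Claim_equal_convert_language_codes : Prop := ∀ (value : String), Dom_convert_language_codes value → Spec_convert_language_codes value (convert_language_codes value)

-- ===== LEMMAS AND PROOFS =====

-- pointwise: A's normalize-then-dict-lookup equals B's direct chain, for any cleaned token
theorem elem_eq (c : String) :
    (((((PySem.Dict.empty).insert "Greek" "el").insert "Latin" "la").insert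
        "Hebrew" "he").insert "Semitic" "sem" : PySem.Dict String String).getD
      (if (["greek", "latin", "hebrew", "semitic"] : List String).contains (PySem.Str.lower c)
       then c else "Unknown") "Unknown"
    = (if c == "Greek" then "el"
       else if c == "Latin" then "la"
       else if c == "Hebrew" then "he"
       else if c == "Semitic" then "sem"
       else "Unknown") := by
  by_cases h1 : c = "Greek"; · subst h1; decide
  by_cases h2 : c = "Latin"; · subst h2; decide
  by_cases h3 : c = "Hebrew"; · subst h3; decide
  by_cases h4 : c = "Semitic"; · subst h4; decide
  have e1 : ("Greek" == c) = false := by rw [beq_eq_false_iff_ne]; exact Ne.symm h1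
  have e2 : ("Latin" == c) = false := by rw [beq_eq_false_iff_ne]; exact Ne.symm h2
  have e3 : ("Hebrew" == c) = false := by rw [beq_eq_false_iff_ne]; exact Ne.symm h3
  have e4 : ("Semitic" == c) = false := by rw [beq_eq_false_iff_ne]; exact Ne.symm h4
  simp only [beq_iff_eq, h1, h2, h3, h4, if_false]
  cases hb : (["greek", "latin", "hebrew", "semitic"] : List String).contains (PySem.Str.lower c) with
  | false =>
    simp only [Bool.false_eq_true, if_false]
    decide
  | true =>
    simp only [if_true]
    simp [PySem.Dict.getD, PySem.Dict.get?, PySem.Dict.insert, PySem.Dict.empty,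
      PySem.Dict.contains, List.find?, e1, e2, e3, e4]

-- B's append-accumulator loop, run from any accumulator, appends exactly A's per-token values
theorem loop_eq (l : List String) (acc : List String) :
    l.foldl
      (fun result lang =>
        result ++
          [if PySem.Str.replace (PySem.Str.replace (PySem.Str.strip lang) "(" "") ")" "" == "Greek" then "el"
           else if PySem.Str.replace (PySem.Str.replace (PySem.Str.strip lang) "(" "") ")" "" == "Latin" then "la"
           else if PySem.Str.replace (PySem.Str.replace (PySem.Str.strip lang) "(" "") ")" "" == "Hebrew" then "he"
           else if PySem.Str.replace (PySem.Str.replace (PySem.Str.strip lang) "(" "") ")" "" == "Semitic" then "sem"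
           else "Unknown"]) acc
    = acc ++ l.map (fun lang =>
        (((((PySem.Dict.empty).insert "Greek" "el").insert "Latin" "la").insert
            "Hebrew" "he").insert "Semitic" "sem" : PySem.Dict String String).getD
          (if (["greek", "latin", "hebrew", "semitic"] : List String).contains
                (PySem.Str.lower (PySem.Str.replace (PySem.Str.replace (PySem.Str.strip lang) "(" "") ")" ""))
           then PySem.Str.replace (PySem.Str.replace (PySem.Str.strip lang) "(" "") ")" ""
           else "Unknown") "Unknown") := by
  induction l generalizing acc with
  | nil => simp
  | cons t ts ih =>
    simp only [List.foldl_cons, List.map_cons, ih, elem_eq]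
    simp

set_option maxHeartbeats 1000000 in
theorem convert_language_codes_eq (value : String) :
    convert_language_codes value = convert_language_codes_alt value := by
  simp only [convert_language_codes, convert_language_codes_alt, convert_languages]
  rw [loop_eq]
  simp [List.map_map, Function.comp]

-- ===== VERDICT (by name: the statement is the Claim_ definition above) =====
theorem convert_language_codes_spec : Claim_equal_convert_language_codes := by
  intro value _
  unfold Spec_convert_language_codes
  exact convert_language_codes_eq value
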